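-- pv_equiv track=rewrite | github.com/Oost-hash/TinyUi | src/tinyui/config/config_tool/flat_to_nested/build/widgets.py | _find_cell_suffixes
-- ===== SOURCE A (Python) =====
-- from typing import Any, Dict, List, Set
--
-- def _find_cell_suffixes(config: Dict[str, Any]) -> Set[str]:
--     """Vind suffixen die Cells vormen (2+ attrs uit bekende cell prefixes).
--
--     Cell prefixes: font_color_, bkg_color_, caption_text_, decimal_places_,
--     column_index_, show_, prefix_, suffix_.
--     """
--     cell_prefixes = [
--         "font_color_", "bkg_color_", "caption_text_", "decimal_places_",
--         "column_index_", "show_", "prefix_", "suffix_",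
--     ]
--
--     # Tel per suffix hoeveel verschillende prefix-types matchen
--     suffix_attrs: Dict[str, Set[str]] = {}
--     for key in config:
--         for cp in cell_prefixes:
--             if key.startswith(cp):
--                 suffix = key[len(cp):]
--                 if suffix not in suffix_attrs:
--                     suffix_attrs[suffix] = set()
--                 suffix_attrs[suffix].add(cp)
--                 break
--
--     # Cell = suffix met 2+ attrs EN minstens font_color of bkg_color
--     color_prefixes = {"font_color_", "bkg_color_"}
--     return {
--         suffix for suffix, attrs in suffix_attrs.items()
--         if len(attrs) >= 2 and attrs & color_prefixes
--     }
-- ===== SOURCE B (Python) =====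
-- from typing import Any, Dict, Set
--
-- def _find_cell_suffixes(config: Dict[str, Any]) -> Set[str]:
--     """Cell suffixes: probe the dict for composed keys instead of grouping
--     prefixes per suffix in an intermediate dict of sets."""
--     cell_prefixes = [
--         "font_color_", "bkg_color_", "caption_text_", "decimal_places_",
--         "column_index_", "show_", "prefix_", "suffix_",
--     ]
--     result = set()
--     for key in config:
--         for cp in cell_prefixes:
--             if key.startswith(cp):
--                 suffix = key[len(cp):]
--                 if ("font_color_" + suffix in config or "bkg_color_" + suffix in config) \
--                         and sum(1 for c in cell_prefixes if c + suffix in config) >= 2: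
--                     result.add(suffix)
--                 break
--     return result
-- ===== Notes on version B (the rewrite author's own statement) =====
-- stated objective: alternative
-- what changed: B drops A's intermediate suffix->set-of-prefixes grouping dict entirely: for each key it strips the matching prefix and decides inclusion by directly probing the config dict for the composed keys prefix+suffix (color probe plus a count of matching prefixes).
import Mathlib
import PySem

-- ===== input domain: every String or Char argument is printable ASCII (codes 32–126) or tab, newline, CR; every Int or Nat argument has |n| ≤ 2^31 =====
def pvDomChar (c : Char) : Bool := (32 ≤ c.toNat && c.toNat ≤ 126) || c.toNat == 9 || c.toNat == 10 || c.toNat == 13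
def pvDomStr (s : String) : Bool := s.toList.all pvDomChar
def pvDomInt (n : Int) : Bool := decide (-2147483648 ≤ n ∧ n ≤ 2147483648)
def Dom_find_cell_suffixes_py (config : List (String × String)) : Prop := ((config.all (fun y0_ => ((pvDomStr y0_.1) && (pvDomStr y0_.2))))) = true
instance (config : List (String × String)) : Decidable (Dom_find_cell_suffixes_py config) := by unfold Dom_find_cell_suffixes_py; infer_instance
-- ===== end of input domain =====

-- B replaces A's intermediate suffix→set-of-prefixes dict by direct membership probes
-- of the composed keys (prefix + suffix) in the config dict; objective: alternative.
-- The Python return type is a set; the ports return its distinct elements as a list.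

-- the 8 cell prefixes, shared by both Pythons
def pvCellPrefixes : List String :=
  ["font_color_", "bkg_color_", "caption_text_", "decimal_places_",
   "column_index_", "show_", "prefix_", "suffix_"]

-- the inner 'for cp in cell_prefixes: if key.startswith(cp): … break' loop of both Pythons:
-- first matching prefix together with the stripped suffix key[len(cp):]
def pvStrip (key : String) : List String → Option (String × String)
  | [] => none
  | cp :: rest =>
      if PySem.Str.startswith key cp then
        some (cp, PySem.Str.slice key (some (PySem.Str.len cp)) none)
      else pvStrip key rest

-- ===== PORT A =====
def find_cell_suffixes_py (config : List (String × String)) : List String :=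
  let keys := (PySem.Dict.ofList config).keys
  let suffix_attrs : PySem.Dict String (PySem.Set String) :=
    keys.foldl (fun d key =>
      match pvStrip key pvCellPrefixes with
      | some (cp, suffix) =>
          d.insert suffix (PySem.Set.add (d.getD suffix PySem.Set.empty) cp)
      | none => d) PySem.Dict.empty
  let color_prefixes : PySem.Set String := PySem.Set.ofList ["font_color_", "bkg_color_"]
  suffix_attrs.items.foldl (fun acc it =>
    if 2 ≤ PySem.Set.len it.2 ∧ PySem.Set.inter it.2 color_prefixes ≠ [] then
      PySem.Set.add acc it.1
    else acc) PySem.Set.empty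

-- ===== PORT B =====
def find_cell_suffixes_py_alt (config : List (String × String)) : List String :=
  let d := PySem.Dict.ofList config
  d.keys.foldl (fun result key =>
    match pvStrip key pvCellPrefixes with
    | some (_, suffix) =>
        if (d.contains ("font_color_" ++ suffix) || d.contains ("bkg_color_" ++ suffix))
            && decide (2 ≤ pvCellPrefixes.countP (fun c => d.contains (c ++ suffix))) then
          PySem.Set.add result suffix
        else result
    | none => result) PySem.Set.empty

-- ===== PRECONDITION & SPEC =====
def Spec_find_cell_suffixes_py (config : List (String × String)) (out : List String) : Prop := out = find_cell_suffixes_py_alt config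
instance (config : List (String × String)) (out : List String) : Decidable (Spec_find_cell_suffixes_py config out) := by unfold Spec_find_cell_suffixes_py; infer_instance

-- ===== CLAIM (what is proved, stated in full; the proofs are below) =====
def Claim_equal_find_cell_suffixes_py : Prop := ∀ (config : List (String × String)), Dom_find_cell_suffixes_py config → Spec_find_cell_suffixes_py config (find_cell_suffixes_py config)

-- ===== LEMMAS AND PROOFS =====

-- no two of the 8 prefixes are prefixes of one another
theorem pvPrefixFree : ∀ c ∈ pvCellPrefixes, ∀ cp ∈ pvCellPrefixes,
    c.toList <+: cp.toList → c = cp := by decide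

theorem pvStartswith_append (x y : String) : PySem.Str.startswith (x ++ y) x = true := by
  rw [PySem.Str.startswith_eq, PySem.Chars.startswith_iff, String.toList_append]
  exact List.prefix_append _ _

theorem pvSlice_append (cp s : String) :
    PySem.Str.slice (cp ++ s) (some (PySem.Str.len cp)) none = s := by
  apply String.toList_inj.mp
  rw [PySem.Str.toList_slice, PySem.Str.len_eq, String.toList_append]
  show PySem.List.slice _ _ _ = _
  rw [PySem.List.slice_from_natCast]
  simp

-- soundness of the strip loop
theorem pvStrip_sound (k cp s : String) (ps : List String)
    (h : pvStrip k ps = some (cp, s)) : cp ∈ ps ∧ k = cp ++ s := by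
  induction ps with
  | nil => simp [pvStrip] at h
  | cons c rest ih =>
      rw [pvStrip] at h
      by_cases hc : PySem.Str.startswith k c = true
      · rw [if_pos hc] at h
        obtain ⟨h1, h2⟩ := Prod.mk.inj (Option.some.inj h)
        subst h1
        subst h2
        refine ⟨List.mem_cons_self, ?_⟩
        rw [PySem.Str.startswith_eq, PySem.Chars.startswith_iff] at hc
        obtain ⟨t, ht⟩ := hc
        apply String.toList_inj.mp
        rw [String.toList_append, PySem.Str.toList_slice, PySem.Str.len_eq]
        show _ = _ ++ PySem.List.slice _ _ _
        rw [PySem.List.slice_from_natCast, ← ht]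
        simp
      · rw [if_neg hc] at h
        obtain ⟨h1, h2⟩ := ih h
        exact ⟨List.mem_cons_of_mem _ h1, h2⟩

-- the strip loop on any prefix list in which cp is the only match
theorem pvStrip_complete_aux (cp s : String) (ps : List String) (hmem : cp ∈ ps)
    (huq : ∀ c ∈ ps, PySem.Str.startswith (cp ++ s) c = true → c = cp) :
    pvStrip (cp ++ s) ps = some (cp, s) := by
  induction ps with
  | nil => simp at hmem
  | cons c rest ih =>
      rw [pvStrip]
      by_cases hc : PySem.Str.startswith (cp ++ s) c = true
      · have hcc : c = cp := huq c List.mem_cons_self hc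
        subst hcc
        rw [if_pos hc, pvSlice_append]
      · have hne : c ≠ cp := fun he => hc (he ▸ pvStartswith_append cp s)
        have hmem' : cp ∈ rest := by
          rcases List.mem_cons.mp hmem with h | h
          · exact absurd h.symm hne
          · exact h
        rw [if_neg hc]
        exact ih hmem' (fun c' hc' => huq c' (List.mem_cons_of_mem _ hc'))

-- completeness on the prefix-free list: stripping cp ++ s finds exactly cp
theorem pvStrip_complete (cp s : String) (hcp : cp ∈ pvCellPrefixes) :
    pvStrip (cp ++ s) pvCellPrefixes = some (cp, s) := by
  apply pvStrip_complete_aux cp s _ hcp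
  intro c hc hsw
  rw [PySem.Str.startswith_eq, PySem.Chars.startswith_iff, String.toList_append] at hsw
  have h2 : cp.toList <+: cp.toList ++ s.toList := List.prefix_append _ _
  rcases List.prefix_or_prefix_of_prefix hsw h2 with h | h
  · exact pvPrefixFree c hc cp hcp h
  · exact (pvPrefixFree cp hcp c hc h).symm

-- the two characterisations together: what pvStrip returns
theorem pvStrip_iff (k cp s : String) :
    pvStrip k pvCellPrefixes = some (cp, s) ↔ cp ∈ pvCellPrefixes ∧ k = cp ++ s := by
  constructor
  · exact pvStrip_sound k cp s pvCellPrefixes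
  · rintro ⟨h1, rfl⟩; exact pvStrip_complete cp s h1

-- proof-side abbreviations
def pvL (K : List String) : List (String × String) :=
  K.filterMap (fun k => pvStrip k pvCellPrefixes)

def pvS (K : List String) : List String := (pvL K).map Prod.snd

def pvAttrs (K : List String) (s : String) : PySem.Set String :=
  PySem.Set.ofList (((pvL K).filter (fun p => p.2 == s)).map Prod.fst)

theorem pvMem_L (K : List String) (cp s : String) :
    (cp, s) ∈ pvL K ↔ cp ∈ pvCellPrefixes ∧ (cp ++ s) ∈ K := by
  rw [pvL, List.mem_filterMap]
  constructor
  · rintro ⟨k, hk, hs⟩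
    obtain ⟨h1, rfl⟩ := (pvStrip_iff k cp s).mp hs
    exact ⟨h1, hk⟩
  · rintro ⟨h1, h2⟩
    exact ⟨cp ++ s, h2, (pvStrip_iff _ cp s).mpr ⟨h1, rfl⟩⟩

-- A's grouping fold, rewritten over the stripped pairs
theorem pvDict_eq (K : List String) :
    K.foldl (fun d key =>
      match pvStrip key pvCellPrefixes with
      | some (cp, suffix) =>
          d.insert suffix (PySem.Set.add (d.getD suffix PySem.Set.empty) cp)
      | none => d) PySem.Dict.empty
    = (pvL K).foldl (fun d p => d.insert p.2 (PySem.Set.add (d.getD p.2 PySem.Set.empty) p.1))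
        PySem.Dict.empty := by
  rw [pvL, List.foldl_filterMap]
  congr 1
  funext d k
  cases h : pvStrip k pvCellPrefixes with
  | none => rfl
  | some b => cases b; rfl

-- value of the grouped dict at any suffix
theorem pvGetD_foldl (L : List (String × String)) (d : PySem.Dict String (PySem.Set String))
    (s : String) :
    (L.foldl (fun d p => d.insert p.2 (PySem.Set.add (d.getD p.2 PySem.Set.empty) p.1)) d).getD
        s PySem.Set.empty
    = PySem.Set.update (d.getD s PySem.Set.empty)
        ((L.filter (fun p => p.2 == s)).map Prod.fst) := by
  induction L generalizing d with
  | nil => simp [PySem.Set.update]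
  | cons p L ih =>
      rw [List.foldl_cons, ih]
      cases hb : (p.2 == s) with
      | true =>
          have hps : p.2 = s := by simpa using hb
          simp only [List.filter_cons, hb, if_true, List.map_cons]
          rw [PySem.Dict.getD_insert, if_pos hps.symm, hps]
          rfl
      | false =>
          have hps : ¬ s = p.2 := fun h => by simp [h] at hb
          simp only [List.filter_cons, hb, Bool.false_eq_true, if_false]
          rw [PySem.Dict.getD_insert, if_neg hps]

-- fold of conditional set-insertions = fold of plain insertions over the filtered list
theorem pvAddIf_filter (p : String → Bool) (xs : List String) :
    ∀ acc : List String,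
    xs.foldl (fun acc x => if p x = true then PySem.Set.add acc x else acc) acc
      = (xs.filter p).foldl PySem.Set.add acc := by
  induction xs with
  | nil => intro acc; rfl
  | cons x xs ih =>
      intro acc
      by_cases hx : p x = true
      · rw [List.foldl_cons, if_pos hx, List.filter_cons_of_pos hx, List.foldl_cons, ih]
      · rw [List.foldl_cons, if_neg hx, List.filter_cons_of_neg hx, ih]

theorem pvFilter_add (p : String → Bool) (acc : List String) (x : String) :
    (PySem.Set.add acc x).filter p
      = if p x = true then PySem.Set.add (acc.filter p) x else acc.filter p := by
  rw [PySem.Set.add]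
  by_cases hm : x ∈ acc
  · have hc : PySem.Set.contains acc x = true := by
      simpa [PySem.Set.contains] using hm
    rw [if_pos hc]
    by_cases hp : p x = true
    · rw [if_pos hp, PySem.Set.add]
      have : PySem.Set.contains (acc.filter p) x = true := by
        simp [PySem.Set.contains, List.mem_filter, hm, hp]
      rw [if_pos this]
    · rw [if_neg hp]
  · have hc : ¬ PySem.Set.contains acc x = true := by
      simpa [PySem.Set.contains] using hm
    rw [if_neg hc, List.filter_append]
    by_cases hp : p x = true
    · rw [if_pos hp, PySem.Set.add]
      have : ¬ PySem.Set.contains (acc.filter p) x = true := by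
        simp [PySem.Set.contains, List.mem_filter]
        intro h; exact absurd h hm
      rw [if_neg this]
      simp [hp]
    · rw [if_neg hp]
      simp [hp]

-- filtering commutes with set-building
theorem pvFilter_foldl_add (p : String → Bool) (xs : List String) :
    ∀ acc : List String,
    (xs.foldl PySem.Set.add acc).filter p = (xs.filter p).foldl PySem.Set.add (acc.filter p) := by
  induction xs with
  | nil => intro acc; rfl
  | cons x xs ih =>
      intro acc
      rw [List.foldl_cons, ih]
      by_cases hp : p x = true
      · rw [List.filter_cons_of_pos hp, List.foldl_cons, pvFilter_add, if_pos hp]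
      · rw [List.filter_cons_of_neg hp, pvFilter_add, if_neg hp]

-- building a set from a duplicate-free list disjoint from the accumulator appends it
theorem pvFoldl_add_nodup (xs : List String) :
    ∀ acc : List String, xs.Nodup → (∀ x ∈ xs, x ∉ acc) →
    xs.foldl PySem.Set.add acc = acc ++ xs := by
  induction xs with
  | nil => intro acc _ _; simp
  | cons x xs ih =>
      intro acc hnd hdisj
      have hc : ¬ PySem.Set.contains acc x = true := by
        simpa [PySem.Set.contains] using hdisj x List.mem_cons_self
      rw [List.foldl_cons, PySem.Set.add, if_neg hc,
        ih (acc ++ [x]) (List.nodup_cons.mp hnd).2]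
      · simp
      · intro y hy
        simp only [List.mem_append, List.mem_singleton]
        rintro (h | rfl)
        · exact hdisj y (List.mem_cons_of_mem _ hy) h
        · exact (List.nodup_cons.mp hnd).1 hy

-- A's filter condition equals B's probe condition, pointwise
theorem pvCond_eq (config : List (String × String)) (s : String) :
    decide (2 ≤ PySem.Set.len (pvAttrs (PySem.Dict.ofList config).keys s) ∧
        PySem.Set.inter (pvAttrs (PySem.Dict.ofList config).keys s)
          (PySem.Set.ofList ["font_color_", "bkg_color_"]) ≠ [])
    = (((PySem.Dict.ofList config).contains ("font_color_" ++ s) ||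
        (PySem.Dict.ofList config).contains ("bkg_color_" ++ s))
      && decide (2 ≤ pvCellPrefixes.countP
            (fun c => (PySem.Dict.ofList config).contains (c ++ s)))) := by
  have hcont : ∀ x, (PySem.Dict.ofList config).contains x
      = decide (x ∈ (PySem.Dict.ofList config).keys) := fun x =>
    PySem.Dict.contains_eq_decide_mem_keys _ _
  have hmem : ∀ c, c ∈ pvAttrs (PySem.Dict.ofList config).keys s ↔
      c ∈ pvCellPrefixes ∧ (c ++ s) ∈ (PySem.Dict.ofList config).keys := by
    intro c
    rw [pvAttrs, PySem.Set.mem_ofList]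
    constructor
    · intro h
      obtain ⟨p, hp, rfl⟩ := List.mem_map.mp h
      obtain ⟨hpL, hps⟩ := List.mem_filter.mp hp
      have : p.2 = s := by simpa using hps
      rw [← this]
      exact (pvMem_L _ p.1 p.2).mp (by simpa using hpL)
    · intro h
      exact List.mem_map.mpr ⟨(c, s), List.mem_filter.mpr
        ⟨(pvMem_L _ c s).mpr h, by simp⟩, rfl⟩
  have hndP : pvCellPrefixes.Nodup := by decide
  have hnd1 : (pvAttrs (PySem.Dict.ofList config).keys s).Nodup := by
    unfold pvAttrs; exact PySem.Set.nodup_ofList _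
  have hperm : (pvAttrs (PySem.Dict.ofList config).keys s).Perm
      (pvCellPrefixes.filter (fun c => decide ((c ++ s) ∈ (PySem.Dict.ofList config).keys))) := by
    rw [List.perm_ext_iff_of_nodup hnd1 (hndP.filter _)]
    intro a
    rw [hmem, List.mem_filter]
    simp
  have hlen : PySem.Set.len (pvAttrs (PySem.Dict.ofList config).keys s)
      = ((pvCellPrefixes.filter
          (fun c => decide ((c ++ s) ∈ (PySem.Dict.ofList config).keys))).length : Int) := by
    rw [PySem.Set.len, hperm.length_eq]
  have hcount : pvCellPrefixes.countP (fun c => (PySem.Dict.ofList config).contains (c ++ s))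
      = (pvCellPrefixes.filter
          (fun c => decide ((c ++ s) ∈ (PySem.Dict.ofList config).keys))).length := by
    rw [← List.countP_eq_length_filter]
    congr 1
    funext c
    rw [hcont]
  have hinter : PySem.Set.inter (pvAttrs (PySem.Dict.ofList config).keys s)
        (PySem.Set.ofList ["font_color_", "bkg_color_"]) ≠ [] ↔
      (("font_color_" ++ s) ∈ (PySem.Dict.ofList config).keys ∨
       ("bkg_color_" ++ s) ∈ (PySem.Dict.ofList config).keys) := by
    have hcolors : PySem.Set.ofList ["font_color_", "bkg_color_"]
        = ["font_color_", "bkg_color_"] := by decide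
    rw [PySem.Set.inter, hcolors, Ne, List.filter_eq_nil_iff]
    push Not
    constructor
    · rintro ⟨a, ha, hca⟩
      have : a = "font_color_" ∨ a = "bkg_color_" := by
        simpa [PySem.Set.contains] using hca
      obtain ⟨haP, haK⟩ := (hmem a).mp ha
      rcases this with rfl | rfl
      · exact Or.inl haK
      · exact Or.inr haK
    · rintro (h | h)
      · exact ⟨"font_color_", (hmem _).mpr ⟨by decide, h⟩, by decide⟩
      · exact ⟨"bkg_color_", (hmem _).mpr ⟨by decide, h⟩, by decide⟩
  have h1 : (2 ≤ PySem.Set.len (pvAttrs (PySem.Dict.ofList config).keys s)) ↔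
      2 ≤ pvCellPrefixes.countP (fun c => (PySem.Dict.ofList config).contains (c ++ s)) := by
    rw [hlen, hcount]
    exact_mod_cast Iff.rfl
  have h2 : (2 ≤ PySem.Set.len (pvAttrs (PySem.Dict.ofList config).keys s) ∧
      PySem.Set.inter (pvAttrs (PySem.Dict.ofList config).keys s)
        (PySem.Set.ofList ["font_color_", "bkg_color_"]) ≠ []) ↔
      ((("font_color_" ++ s) ∈ (PySem.Dict.ofList config).keys ∨
        ("bkg_color_" ++ s) ∈ (PySem.Dict.ofList config).keys) ∧
       2 ≤ pvCellPrefixes.countP (fun c => (PySem.Dict.ofList config).contains (c ++ s))) := by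
    rw [h1, hinter, and_comm]
  rw [decide_eq_decide.mpr h2, hcont ("font_color_" ++ s), hcont ("bkg_color_" ++ s)]
  · simp
  · infer_instance

def pvCondA (config : List (String × String)) (s : String) : Bool :=
  decide (2 ≤ PySem.Set.len (pvAttrs (PySem.Dict.ofList config).keys s) ∧
    PySem.Set.inter (pvAttrs (PySem.Dict.ofList config).keys s)
      (PySem.Set.ofList ["font_color_", "bkg_color_"]) ≠ [])

def pvCondB (config : List (String × String)) (s : String) : Bool :=
  ((PySem.Dict.ofList config).contains ("font_color_" ++ s) ||
      (PySem.Dict.ofList config).contains ("bkg_color_" ++ s))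
    && decide (2 ≤ pvCellPrefixes.countP (fun c => (PySem.Dict.ofList config).contains (c ++ s)))

theorem pvCond_eq' (config : List (String × String)) : pvCondA config = pvCondB config :=
  funext fun s => pvCond_eq config s

-- A's port, reduced to filtering the deduplicated suffix list
theorem pvA_eq (config : List (String × String)) :
    find_cell_suffixes_py config
      = ((pvS (PySem.Dict.ofList config).keys).foldl PySem.Set.add PySem.Set.empty).filter
          (pvCondA config) := by
  simp only [find_cell_suffixes_py]
  rw [pvDict_eq]
  have hnodup : ((pvL (PySem.Dict.ofList config).keys).foldl
      (fun d p => d.insert p.2 (PySem.Set.add (d.getD p.2 PySem.Set.empty) p.1))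
      PySem.Dict.empty).keys.Nodup :=
    PySem.Dict.nodup_keys_foldl_insert_key _ _ _ _ PySem.Dict.nodup_keys_empty
  rw [PySem.Dict.items_eq_map_keys _ hnodup PySem.Set.empty]
  rw [List.foldl_map]
  have hgetD : ∀ s, ((pvL (PySem.Dict.ofList config).keys).foldl
      (fun d p => d.insert p.2 (PySem.Set.add (d.getD p.2 PySem.Set.empty) p.1))
      PySem.Dict.empty).getD s PySem.Set.empty = pvAttrs (PySem.Dict.ofList config).keys s := by
    intro s
    rw [pvGetD_foldl, PySem.Dict.getD_empty]
    rfl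
  have hfun : (fun (acc : PySem.Set String) (s : String) =>
      if 2 ≤ PySem.Set.len (((pvL (PySem.Dict.ofList config).keys).foldl
            (fun d p => d.insert p.2 (PySem.Set.add (d.getD p.2 PySem.Set.empty) p.1))
            PySem.Dict.empty).getD s PySem.Set.empty) ∧
          PySem.Set.inter (((pvL (PySem.Dict.ofList config).keys).foldl
            (fun d p => d.insert p.2 (PySem.Set.add (d.getD p.2 PySem.Set.empty) p.1))
            PySem.Dict.empty).getD s PySem.Set.empty)
            (PySem.Set.ofList ["font_color_", "bkg_color_"]) ≠ [] then
        PySem.Set.add acc s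
      else acc)
      = (fun acc s => if pvCondA config s = true then PySem.Set.add acc s else acc) := by
    funext acc s
    rw [hgetD s]
    simp only [pvCondA, decide_eq_true_eq]
  rw [hfun, pvAddIf_filter]
  have hkeys : ((pvL (PySem.Dict.ofList config).keys).foldl
      (fun d p => d.insert p.2 (PySem.Set.add (d.getD p.2 PySem.Set.empty) p.1))
      PySem.Dict.empty).keys
      = (pvS (PySem.Dict.ofList config).keys).foldl PySem.Set.add PySem.Set.empty := by
    rw [PySem.Dict.keys_foldl_insert_key, PySem.Dict.keys_empty]
    rfl
  rw [pvFoldl_add_nodup _ PySem.Set.empty (hnodup.filter _) (by intro x _ h; simp [PySem.Set.empty] at h)]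
  rw [hkeys]
  rfl

-- B's port, reduced to deduplicating the filtered suffix list
theorem pvB_eq (config : List (String × String)) :
    find_cell_suffixes_py_alt config
      = ((pvS (PySem.Dict.ofList config).keys).filter (pvCondB config)).foldl PySem.Set.add
          PySem.Set.empty := by
  simp only [find_cell_suffixes_py_alt]
  have hbridge : (PySem.Dict.ofList config).keys.foldl (fun result key =>
      match pvStrip key pvCellPrefixes with
      | some (_, suffix) =>
          if ((PySem.Dict.ofList config).contains ("font_color_" ++ suffix) ||
              (PySem.Dict.ofList config).contains ("bkg_color_" ++ suffix))
              && decide (2 ≤ pvCellPrefixes.countP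
                  (fun c => (PySem.Dict.ofList config).contains (c ++ suffix))) then
            PySem.Set.add result suffix
          else result
      | none => result) PySem.Set.empty
      = (pvL (PySem.Dict.ofList config).keys).foldl
          (fun acc p => if pvCondB config p.2 = true then PySem.Set.add acc p.2 else acc)
          PySem.Set.empty := by
    rw [pvL, List.foldl_filterMap]
    congr 1
    funext acc k
    cases h : pvStrip k pvCellPrefixes with
    | none => rfl
    | some b => cases b; rfl
  rw [hbridge]
  have hmap := List.foldl_map (f := fun p : String × String => p.2)
    (g := fun acc s => if pvCondB config s = true then PySem.Set.add acc s else acc)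
    (l := pvL (PySem.Dict.ofList config).keys) (init := PySem.Set.empty)
  rw [← hmap, pvAddIf_filter]
  rfl

-- ===== VERDICT (by name: the statement is the Claim_ definition above) =====
theorem find_cell_suffixes_py_spec : Claim_equal_find_cell_suffixes_py := by
  intro config _
  unfold Spec_find_cell_suffixes_py
  rw [pvA_eq, pvB_eq, pvCond_eq']
  rw [pvFilter_foldl_add]
  rfl
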